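-- pv_equiv track=rewrite | github.com/hswek/algorithm | 프로그래머스/3/152995. 인사고과/인사고과.py | solution
-- ===== SOURCE A (Python) =====
-- def solution(scores):
--     answer = 1
--     t=scores[0]
--     t_s=sum(t)
--     scores.sort(key=lambda x:[-x[0],x[1]])
--     high=0
--     for i,j in scores:
--         if t[0]<i and t[1]<j:
--             return -1
--         if high <=j:
--             if t_s < i+j:
--                 answer+=1
--             high=j
--     return answer
-- ===== SOURCE B (Python) =====
-- def solution(scores):
--     # Return-value re-implementation: no sort, direct dominance scans.
--     # (A sorts `scores` in place; B leaves the argument untouched -- the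
--     # equivalence claimed is about the return value only.)
--     t = scores[0]
--     ts = t[0] + t[1]
--     if any(o[0] > t[0] and o[1] > t[1] for o in scores):
--         return -1
--     return 1 + sum(1 for e in scores
--                    if e[0] + e[1] > ts
--                    and not any(o[0] > e[0] and o[1] > e[1] for o in scores))
-- ===== Notes on version B (the rewrite author's own statement) =====
-- stated objective: simpler
-- what changed: A sorts by (-first, second) and runs a single pass with a running maximum and an early -1 return; B does no sorting (and no in-place mutation) and instead decides each employee's eligibility by a direct nested dominance scan, returning 1 plus the count of non-dominated employees whose score sum strictly exceeds scores[0]'s.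
-- intended difference: On inputs where scores[0] is not strictly dominated but some other non-dominated employee with a NEGATIVE second score has a score sum above scores[0]'s, A returns an undercount (its running maximum starts at 0, so such employees are silently skipped) while B counts them; B's value follows the intended rule 'count everyone not strictly dominated whose sum exceeds scores[0]'s'. — e.g. on solution([[0, 0], [2, -1]]): A returns 1, B returns 2
-- outside the precondition, e.g. on solution([[0, 0], [5, 5], [1, 2, 3]]): A returns -1, B returns -1
import Mathlib
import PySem

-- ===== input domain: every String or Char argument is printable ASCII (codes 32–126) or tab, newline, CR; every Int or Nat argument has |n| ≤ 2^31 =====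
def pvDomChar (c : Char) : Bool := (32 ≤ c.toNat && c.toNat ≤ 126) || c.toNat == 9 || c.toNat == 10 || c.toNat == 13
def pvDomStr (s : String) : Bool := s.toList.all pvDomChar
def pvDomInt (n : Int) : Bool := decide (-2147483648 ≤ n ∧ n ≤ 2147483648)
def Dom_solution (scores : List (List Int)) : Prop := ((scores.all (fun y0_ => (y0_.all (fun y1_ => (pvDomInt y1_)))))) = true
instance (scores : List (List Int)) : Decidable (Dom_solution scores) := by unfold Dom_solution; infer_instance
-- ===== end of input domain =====

-- B does not mutate its argument (A sorts `scores` in place); the equivalence below is about the return value.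

-- ===== PORT A =====
-- the for-loop of A, with its early `return -1` (row of length ≠ 2: tuple unpacking raises, excluded by Pre_solution)
def solLoopA (t0 t1 ts : Int) : List (List Int) → Int → Int → Int
  | [], answer, _ => answer
  | row :: rest, answer, high =>
    match row with
    | [i, j] =>
      if t0 < i ∧ t1 < j then -1
      else if high ≤ j then
        if ts < i + j then solLoopA t0 t1 ts rest (answer + 1) j
        else solLoopA t0 t1 ts rest answer j
      else solLoopA t0 t1 ts rest answer high
    | _ => 0

def solution (scores : List (List Int)) : Int :=
  match scores with
  | [] => 0   -- scores[0] raises IndexError; excluded by Pre_solution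
  | t :: _ =>
    let t_s : Int := t.sum
    let s := PySem.List.sorted2 scores (fun x => -(PySem.List.pyGetD x 0 0)) (fun x => PySem.List.pyGetD x 1 0) false
    solLoopA (PySem.List.pyGetD t 0 0) (PySem.List.pyGetD t 1 0) t_s s 1 0

-- ===== PORT B =====
-- `any(o[0] > e[0] and o[1] > e[1] for o in scores)`
def beaten (e : List Int) (scores : List (List Int)) : Bool :=
  scores.any (fun o =>
    decide (PySem.List.pyGetD e 0 0 < PySem.List.pyGetD o 0 0) &&
    decide (PySem.List.pyGetD e 1 0 < PySem.List.pyGetD o 1 0))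

def solution_alt (scores : List (List Int)) : Int :=
  match scores with
  | [] => 0   -- scores[0] raises IndexError; excluded by Pre_solution
  | t :: _ =>
    let ts : Int := PySem.List.pyGetD t 0 0 + PySem.List.pyGetD t 1 0
    if beaten t scores then -1
    else 1 + (scores.countP (fun e =>
        decide (ts < PySem.List.pyGetD e 0 0 + PySem.List.pyGetD e 1 0) && !(beaten e scores)) : Int)

-- ===== PRECONDITION & SPEC =====
-- Pre_ excludes the empty list (scores[0] → IndexError) and inputs with a row whose length is not 2
-- (tuple unpacking `for i,j in scores` → ValueError, or IndexError in the sort key); on a few such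
-- inputs A still returns -1 because it hits a dominating row before the malformed one — there B
-- returns -1 as well, so nothing observable is lost by the exclusion.
def Pre_solution (scores : List (List Int)) : Prop :=
  scores ≠ [] ∧ ∀ r ∈ scores, r.length = 2
instance (scores : List (List Int)) : Decidable (Pre_solution scores) := by unfold Pre_solution; infer_instance
def pvWitness_solution : List (List Int) := [[1, 2], [3, 1]]

-- On inputs where scores[0] is not strictly dominated but some non-dominated employee with a NEGATIVE
-- second score has a score sum above scores[0]'s, A returns an undercount (its running maximum starts
-- at 0, so such employees are silently skipped) while B counts them; B's value follows the intended
-- rule "count everyone not strictly dominated whose sum exceeds scores[0]'s".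
def D_solution (scores : List (List Int)) : Prop :=
  ∃ t ∈ scores.take 1, ∃ e ∈ scores,
    e.getD 1 0 < 0 ∧ t.sum < e.sum ∧
    ∀ p ∈ [t, e], ∀ o ∈ scores, o.getD 0 0 ≤ p.getD 0 0 ∨ o.getD 1 0 ≤ p.getD 1 0
instance (scores : List (List Int)) : Decidable (D_solution scores) := by unfold D_solution; infer_instance

def Spec_solution (scores : List (List Int)) (out : Int) : Prop :=
  ¬ D_solution scores → out = solution_alt scores
instance (scores : List (List Int)) (out : Int) : Decidable (Spec_solution scores out) := by unfold Spec_solution; infer_instance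

def pvDiffWitness_solution : List (List Int) := [[0, 0], [2, -1]]
def pvDiffWitnessOut_solution : Int × Int := (1, 2)

-- ===== CLAIM (what is proved, stated in full; the proofs are below) =====
def Claim_unchanged_solution : Prop := ∀ (scores : List (List Int)), Dom_solution scores → Pre_solution scores → Spec_solution scores (solution scores)
def Claim_changed_solution : Prop := Dom_solution (pvDiffWitness_solution) ∧ Pre_solution (pvDiffWitness_solution) ∧ D_solution (pvDiffWitness_solution) ∧ solution (pvDiffWitness_solution) = pvDiffWitnessOut_solution.1 ∧ solution_alt (pvDiffWitness_solution) = pvDiffWitnessOut_solution.2 ∧ pvDiffWitnessOut_solution.1 ≠ pvDiffWitnessOut_solution.2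
def Claim_exact_solution : Prop := ∀ (scores : List (List Int)), Dom_solution scores → Pre_solution scores → D_solution scores → solution scores ≠ solution_alt scores

-- ===== LEMMAS AND PROOFS =====

-- x[0] and x[1] of a row, as the ports read them
def g0 (r : List Int) : Int := PySem.List.pyGetD r 0 0
def g1 (r : List Int) : Int := PySem.List.pyGetD r 1 0

-- the order A's sort establishes: first component descending, ties by second ascending
def Rord (a b : List Int) : Prop := g0 b < g0 a ∨ (g0 a = g0 b ∧ g1 a ≤ g1 b)

-- A's list-valued sort key [-x[0], x[1]] is the lexicographic pair key
lemma sorted2_eq_sorted_lex (xs : List (List Int)) (k1 k2 : List Int → Int) :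
    PySem.List.sorted2 xs k1 k2 false = PySem.List.sorted xs (fun x => toLex (k1 x, k2 x)) false := by
  unfold PySem.List.sorted2 PySem.List.sorted
  dsimp only
  congr 1
  funext acc x
  congr 1
  funext a b
  refine Bool.eq_iff_iff.mpr ?_
  simp [Prod.Lex.lt_iff]
  omega

lemma beaten_eq_false_iff (e : List Int) (S : List (List Int)) :
    beaten e S = false ↔ ∀ o ∈ S, ¬(g0 e < g0 o ∧ g1 e < g1 o) := by
  simp [beaten, List.any_eq_false, g0, g1]

-- A's running maximum `high` admits the head of the remaining list iff that head has a
-- nonnegative second score and is not strictly dominated in the whole sorted list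
lemma kept_iff (S P L : List (List Int)) (e : List Int)
    (hS : S = P ++ e :: L) (hp : S.Pairwise Rord) :
    ((P.map g1).foldl max 0 ≤ g1 e) ↔ (0 ≤ g1 e ∧ beaten e S = false) := by
  subst hS
  rw [List.pairwise_append] at hp
  obtain ⟨-, hpL, hPL⟩ := hp
  rw [List.pairwise_cons] at hpL
  obtain ⟨heL, -⟩ := hpL
  constructor
  · intro hk
    have h0 : (0 : Int) ≤ (P.map g1).foldl max 0 := (PySem.List.le_foldl_max _ _).1
    refine ⟨le_trans h0 hk, (beaten_eq_false_iff _ _).mpr ?_⟩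
    intro o ho hdom
    rcases List.mem_append.mp ho with hoP | hoEL
    · have : g1 o ≤ (P.map g1).foldl max 0 :=
        (PySem.List.le_foldl_max _ _).2 _ (List.mem_map_of_mem hoP)
      omega
    · rcases List.mem_cons.mp hoEL with rfl | hoL
      · omega
      · have := heL o hoL
        unfold Rord at this
        omega
  · rintro ⟨h0, hnb⟩
    rw [beaten_eq_false_iff] at hnb
    have hub : ∀ y ∈ P.map g1, y ≤ g1 e := by
      intro y hy
      obtain ⟨p, hpP, rfl⟩ := List.mem_map.mp hy
      have hR := hPL p hpP e (List.mem_cons_self ..)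
      unfold Rord at hR
      have hnd := hnb p (List.mem_append_left _ hpP)
      omega
    rcases PySem.List.foldl_max_mem (P.map g1) 0 with h | h
    · omega
    · exact hub _ h

-- characterisation of A's loop: starting from any processed prefix P of the sorted list S
lemma loopA_spec (t0 t1 ts : Int) (S : List (List Int))
    (hlen : ∀ r ∈ S, r.length = 2) (hp : S.Pairwise Rord) :
    ∀ L P, S = P ++ L → ∀ ans,
      solLoopA t0 t1 ts L ans ((P.map g1).foldl max 0) =
        if L.any (fun e => decide (t0 < g0 e) && decide (t1 < g1 e)) then -1
        else ans + (L.countP (fun e =>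
          (decide (0 ≤ g1 e) && !(beaten e S)) && decide (ts < g0 e + g1 e)) : Int) := by
  intro L
  induction L with
  | nil => intro P hS ans; simp [solLoopA]
  | cons e L ih =>
    intro P hS ans
    have heS : e ∈ S := by rw [hS]; exact List.mem_append_right _ (List.mem_cons_self ..)
    have hel := hlen e heS
    obtain ⟨i, j, rfl⟩ : ∃ i j, e = [i, j] := by
      rcases e with - | ⟨i, - | ⟨j, - | ⟨k, e⟩⟩⟩
      · simp at hel
      · simp at hel
      · exact ⟨i, j, rfl⟩
      · simp at hel
    have hg0 : g0 [i, j] = i := rfl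
    have hg1 : g1 [i, j] = j := rfl
    have hS' : S = (P ++ [[i, j]]) ++ L := by rw [hS]; simp
    by_cases hd : t0 < i ∧ t1 < j
    · simp [solLoopA, hd, hg0, hg1]
    · have hk_iff := kept_iff S P L [i, j] hS hp
      rw [hg1] at hk_iff
      by_cases hk : (P.map g1).foldl max 0 ≤ j
      · have hkeep := hk_iff.mp hk
        have hfold : (((P ++ [[i, j]]).map g1).foldl max 0) = j := by
          rw [List.map_append, List.foldl_append]
          simp [hg1]
          omega
        have hih := ih (P ++ [[i, j]]) hS'
        rw [hfold] at hih
        by_cases hsum : ts < i + j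
        · have : solLoopA t0 t1 ts ([i, j] :: L) ans ((P.map g1).foldl max 0)
              = solLoopA t0 t1 ts L (ans + 1) j := by
            simp [solLoopA, hd, hk, hsum]
          rw [this, hih]
          simp only [List.any_cons, List.countP_cons, hg0, hg1]
          have hdf : (decide (t0 < i) && decide (t1 < j)) = false := by
            simp; omega
          rw [hdf]
          simp only [Bool.false_or]
          split
          · rfl
          · have hpt : (decide (0 ≤ j) && !beaten [i, j] S && decide (ts < i + j)) = true := by
              simp [hkeep.2]; exact ⟨hkeep.1, hsum⟩
            rw [hpt]
            simp only [if_pos trivial]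
            push_cast
            ring
        · have : solLoopA t0 t1 ts ([i, j] :: L) ans ((P.map g1).foldl max 0)
              = solLoopA t0 t1 ts L ans j := by
            simp [solLoopA, hd, hk, hsum]
          rw [this, hih]
          simp only [List.any_cons, List.countP_cons, hg0, hg1]
          have hdf : (decide (t0 < i) && decide (t1 < j)) = false := by
            simp; omega
          rw [hdf]
          simp only [Bool.false_or]
          split
          · rfl
          · have hpt : (decide (0 ≤ j) && !beaten [i, j] S && decide (ts < i + j)) = false := by
              simp; intro _ _; omega
            rw [hpt]
            simp
      · have hfold : (((P ++ [[i, j]]).map g1).foldl max 0) = (P.map g1).foldl max 0 := by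
          rw [List.map_append, List.foldl_append]
          simp [hg1]
          omega
        have hih := ih (P ++ [[i, j]]) hS'
        rw [hfold] at hih
        have : solLoopA t0 t1 ts ([i, j] :: L) ans ((P.map g1).foldl max 0)
            = solLoopA t0 t1 ts L ans ((P.map g1).foldl max 0) := by
          simp [solLoopA, hd, hk]
        rw [this, hih]
        simp only [List.any_cons, List.countP_cons, hg0, hg1]
        have hdf : (decide (t0 < i) && decide (t1 < j)) = false := by
          simp; omega
        rw [hdf]
        simp only [Bool.false_or]
        split
        · rfl
        · have hpt : (decide (0 ≤ j) && !beaten [i, j] S && decide (ts < i + j)) = false := by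
            have h2 := fun h0 hb => hk (hk_iff.mpr ⟨h0, hb⟩)
            simp
            intro h0 hb
            exact absurd hb (by simpa using h2 h0)
          rw [hpt]
          simp

-- closed form of A on inputs satisfying Pre_: -1 if scores[0] is dominated, else
-- 1 + #(employees with nonnegative second score, not dominated, sum above scores[0]'s)
lemma solutionA_closed (t : List Int) (rest : List (List Int))
    (hlen : ∀ r ∈ t :: rest, r.length = 2) :
    solution (t :: rest) =
      if beaten t (t :: rest) then -1
      else 1 + ((t :: rest).countP (fun e =>
        (decide (0 ≤ g1 e) && !(beaten e (t :: rest))) &&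
        decide (g0 t + g1 t < g0 e + g1 e)) : Int) := by
  have hts : t.sum = g0 t + g1 t := by
    have := hlen t (List.mem_cons_self ..)
    rcases t with - | ⟨a, - | ⟨b, - | ⟨c, t⟩⟩⟩
    · simp at this
    · simp at this
    · show a + (b + 0) = a + b; ring
    · simp at this
  set scores := t :: rest with hsc
  set S := PySem.List.sorted2 scores (fun x => -(PySem.List.pyGetD x 0 0))
      (fun x => PySem.List.pyGetD x 1 0) false with hSdef
  have hperm : S.Perm scores := PySem.List.sorted2_perm ..
  have hlenS : ∀ r ∈ S, r.length = 2 := fun r hr => hlen r (hperm.mem_iff.mp hr)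
  have hpair : S.Pairwise Rord := by
    rw [hSdef, sorted2_eq_sorted_lex]
    refine (PySem.List.sorted_pairwise scores _).imp ?_
    intro a b hab
    rw [Prod.Lex.le_iff] at hab
    unfold Rord g0 g1
    simp only [ofLex_toLex] at hab
    rcases hab with h | ⟨h1, h2⟩
    · left; omega
    · right; constructor <;> [omega; exact h2]
  have hloop := loopA_spec (g0 t) (g1 t) (g0 t + g1 t) S hlenS hpair S [] rfl 1
  have hsolve : solution scores =
      solLoopA (g0 t) (g1 t) t.sum S 1 (((List.map g1 []).foldl max 0)) := rfl
  rw [hsolve, hts, hloop]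
  have hany : S.any (fun e => decide (g0 t < g0 e) && decide (g1 t < g1 e))
      = beaten t scores := by
    rw [hperm.any_eq]; rfl
  rw [hany]
  have hcnt : S.countP (fun e => (decide (0 ≤ g1 e) && !(beaten e S)) &&
        decide (g0 t + g1 t < g0 e + g1 e))
      = scores.countP (fun e => (decide (0 ≤ g1 e) && !(beaten e scores)) &&
        decide (g0 t + g1 t < g0 e + g1 e)) := by
    rw [hperm.countP_eq]
    refine List.countP_congr ?_
    intro e he
    have hb : beaten e S = beaten e scores := hperm.any_eq
    rw [hb]
  rw [hcnt]

-- B, written with the same abbreviations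
lemma solutionB_closed (t : List Int) (rest : List (List Int)) :
    solution_alt (t :: rest) =
      if beaten t (t :: rest) then -1
      else 1 + ((t :: rest).countP (fun e =>
        decide (g0 t + g1 t < g0 e + g1 e) && !(beaten e (t :: rest))) : Int) := rfl

lemma countP_lt_of_witness {a : Type} (p q : a → Bool) (l : List a)
    (h : ∀ x ∈ l, p x = true → q x = true) (e : a) (he : e ∈ l)
    (hq : q e = true) (hp : p e = false) : l.countP p < l.countP q := by
  induction l with
  | nil => cases he
  | cons x l ih =>
    rw [List.countP_cons, List.countP_cons]
    have hmono : l.countP p ≤ l.countP q :=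
      List.countP_mono_left (fun y hy => h y (List.mem_cons_of_mem _ hy))
    rcases List.mem_cons.mp he with rfl | he'
    · rw [hp, hq]; simpa using hmono
    · have hx := h x (List.mem_cons_self ..)
      have := ih (fun y hy => h y (List.mem_cons_of_mem _ hy)) he'
      cases hpx : p x <;> cases hqx : q x <;> simp_all

-- rows of length 2: Python-style indexing, plain indexing and the sum agree
lemma getD_eq_g (r : List Int) (h : r.length = 2) :
    r.getD 0 0 = g0 r ∧ r.getD 1 0 = g1 r ∧ r.sum = g0 r + g1 r := by
  rcases r with - | ⟨a, - | ⟨b, - | ⟨c, r⟩⟩⟩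
  · simp at h
  · simp at h
  · refine ⟨rfl, rfl, ?_⟩
    show a + (b + 0) = a + b
    ring
  · simp at h

-- D_solution, restated for a head-led list of length-2 rows
lemma D_iff (t : List Int) (rest : List (List Int))
    (hlen : ∀ r ∈ t :: rest, r.length = 2) :
    D_solution (t :: rest) ↔
      (beaten t (t :: rest) = false ∧
       ∃ e ∈ t :: rest, g1 e < 0 ∧ g0 t + g1 t < g0 e + g1 e ∧
         beaten e (t :: rest) = false) := by
  have hg : ∀ r ∈ t :: rest, r.getD 0 0 = g0 r ∧ r.getD 1 0 = g1 r ∧ r.sum = g0 r + g1 r :=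
    fun r hr => getD_eq_g r (hlen r hr)
  have htm : t ∈ t :: rest := List.mem_cons_self ..
  have hbeq : ∀ e ∈ t :: rest, (beaten e (t :: rest) = false ↔
      ∀ o ∈ t :: rest, o.getD 0 0 ≤ e.getD 0 0 ∨ o.getD 1 0 ≤ e.getD 1 0) := by
    intro e he
    rw [beaten_eq_false_iff]
    constructor
    · intro h o ho
      have h1 := h o ho
      have h2 := hg o ho
      have h3 := hg e he
      omega
    · intro h o ho
      have h1 := h o ho
      have h2 := hg o ho
      have h3 := hg e he
      omega
  unfold D_solution
  have hgt := hg t htm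
  constructor
  · rintro ⟨t', ht', e, he, h1, h2, hdom⟩
    simp only [List.take, List.mem_singleton] at ht'
    rw [ht'] at h2 hdom
    have hge := hg e he
    refine ⟨(hbeq t htm).mpr (hdom t (by simp)), e, he, by omega, by omega,
      (hbeq e he).mpr (hdom e (by simp))⟩
  · rintro ⟨hnd, e, he, h1, h2, hnd2⟩
    have hge := hg e he
    refine ⟨t, by simp [List.take], e, he, by omega, by omega, ?_⟩
    intro p hp
    rcases List.mem_cons.mp hp with rfl | hp'
    · exact (hbeq p htm).mp hnd
    · rw [List.mem_singleton] at hp'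
      subst hp'
      exact (hbeq p he).mp hnd2

-- ===== VERDICT (by name: the statement is the Claim_ definition above) =====
theorem solution_spec : Claim_unchanged_solution := by
  intro scores hdom hpre hnD
  rcases scores with - | ⟨t, rest⟩
  · exact absurd rfl hpre.1
  have hlen := hpre.2
  rw [solutionA_closed t rest hlen, solutionB_closed t rest]
  by_cases hb : beaten t (t :: rest) = true
  · simp [hb]
  · rw [Bool.not_eq_true] at hb
    rw [hb]
    simp only [Bool.false_eq_true, if_false]
    have hcnt : (t :: rest).countP (fun e =>
          (decide (0 ≤ g1 e) && !(beaten e (t :: rest))) &&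
          decide (g0 t + g1 t < g0 e + g1 e))
        = (t :: rest).countP (fun e =>
          decide (g0 t + g1 t < g0 e + g1 e) && !(beaten e (t :: rest))) := by
      refine List.countP_congr ?_
      intro e he
      constructor
      · intro h
        simp only [Bool.and_eq_true, decide_eq_true_iff, Bool.not_eq_true'] at h ⊢
        exact ⟨h.2, h.1.2⟩
      · intro h
        simp only [Bool.and_eq_true, decide_eq_true_iff, Bool.not_eq_true'] at h ⊢
        refine ⟨⟨?_, h.2⟩, h.1⟩
        by_contra h0
        have h0' : g1 e < 0 := by omega
        exact hnD ((D_iff t rest hlen).mpr ⟨hb, e, he, h0', h.1, h.2⟩)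
    rw [hcnt]
theorem solution_changed : Claim_changed_solution := by
  unfold Claim_changed_solution; decide
theorem solution_tight : Claim_exact_solution := by
  intro scores hdom hpre hD
  rcases scores with - | ⟨t, rest⟩
  · exact absurd rfl hpre.1
  obtain ⟨hb, e, he, h1, h2, hnb⟩ := (D_iff t rest hpre.2).mp hD
  rw [solutionA_closed t rest hpre.2, solutionB_closed t rest, hb]
  simp only [Bool.false_eq_true, if_false]
  have hlt : (t :: rest).countP (fun e =>
        (decide (0 ≤ g1 e) && !(beaten e (t :: rest))) &&
        decide (g0 t + g1 t < g0 e + g1 e))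
      < (t :: rest).countP (fun e =>
        decide (g0 t + g1 t < g0 e + g1 e) && !(beaten e (t :: rest))) := by
    refine countP_lt_of_witness _ _ _ ?_ e he ?_ ?_
    · intro x hx h
      simp only [Bool.and_eq_true] at h ⊢
      exact ⟨h.2, h.1.2⟩
    · simp [hnb, h2]
    · simp [show ¬(0 ≤ g1 e) from by omega]
  intro hcontra
  omega
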